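-- pv_equiv track=rewrite | github.com/Mikael2983/OC-P12_Develop_secure_back-end_architecture_with_Python_and_SQL | epic_event/render_engine.py | _replace_blocks
-- ===== SOURCE A (Python) =====
-- from typing import Any, Dict, List, Optional, Tuple, Union
--
-- Context = Dict[str, Any]
--
-- def _replace_blocks(parsed: List[str], context: Context) -> List[str]:
--     """Replaces block placeholders in a base template with child overrides.
--
--     Args:
--         parsed: Parsed parts from base template.
--         context: Block content from child template.
--
--     Returns:
--         A list of parts with replaced blocks.
--     """
--     result = []
--     i = 0
--     while i < len(parsed):
--         part = parsed[i]
--         if "{% block" in part: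
--             block_name = part.split()[2]
--             i += 1
--             while i < len(parsed) and "endblock" not in parsed[i]:
--                 i += 1
--             i += 1  # skip endblock
--             if block_name in context:
--                 result.extend(context[block_name])
--             continue
--         result.append(part)
--         i += 1
--     return result
-- ===== SOURCE B (Python) =====
-- def _replace_blocks(parsed, context):
--     """Divide-and-slice recursion: slice around the first block region, recurse on the tail."""
--     for i, part in enumerate(parsed):
--         if "{% block" in part:
--             name = part.split()[2]
--             repl = list(context[name]) if name in context else []
--             j = next((k for k in range(i + 1, len(parsed)) if "endblock" in parsed[k]),
--                      len(parsed))
--             return parsed[:i] + repl + _replace_blocks(parsed[j + 1:], context)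
--     return list(parsed)
-- ===== Notes on version B (the rewrite author's own statement) =====
-- stated objective: alternative
-- what changed: Replaced A's imperative index-walking while-loop (with nested endblock-skipping inner loop and a result accumulator) by a recursive divide-and-slice decomposition: locate the first block marker and its closing endblock by index search, return prefix-slice + override + recursive call on the tail slice.
-- outside the precondition, e.g. on _replace_blocks(['{% block x %}', '{% block', '{% endblock %}'], {}): A returns [], B returns []
import Mathlib
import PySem

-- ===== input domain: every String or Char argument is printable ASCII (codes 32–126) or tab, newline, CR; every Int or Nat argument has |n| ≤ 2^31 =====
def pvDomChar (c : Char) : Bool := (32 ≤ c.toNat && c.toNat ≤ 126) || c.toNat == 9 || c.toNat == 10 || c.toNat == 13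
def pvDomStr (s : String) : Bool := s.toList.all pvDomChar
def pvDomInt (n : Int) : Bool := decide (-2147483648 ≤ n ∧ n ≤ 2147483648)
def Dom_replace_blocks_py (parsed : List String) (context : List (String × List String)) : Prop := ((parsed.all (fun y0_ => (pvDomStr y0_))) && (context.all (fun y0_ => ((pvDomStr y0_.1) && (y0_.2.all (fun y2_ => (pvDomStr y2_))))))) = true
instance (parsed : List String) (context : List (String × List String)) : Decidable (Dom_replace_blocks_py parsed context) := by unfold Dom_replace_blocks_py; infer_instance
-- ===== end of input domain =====

-- B replaces A's imperative index-walking while-loop (with its nested endblock-skipping inner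
-- loop and result accumulator) by a recursive divide-and-slice decomposition: find the first
-- block marker and its closing endblock by index search, return prefix + override + recursion
-- on the tail slice. Same output, same O(n) cost.

-- ===== PORT A =====
-- inner while loop: advance i until a part containing "endblock", then one more ("skip endblock")
def pyASkip : List String → List String
  | [] => []
  | p :: rest => if PySem.Str.isIn "endblock" p then rest else pyASkip rest

-- needed by pyALoop's decreasing_by
theorem pyASkip_length_le (l : List String) : (pyASkip l).length ≤ l.length := by
  induction l with
  | nil => simp [pyASkip]
  | cons p rest ih =>
    simp only [pyASkip]
    split
    · simp
    · exact Nat.le_succ_of_le ih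

-- outer while loop over the remaining suffix of parsed
def pyALoop (ctx : PySem.Dict String (List String)) : List String → List String
  | [] => []
  | p :: rest =>
    if PySem.Str.isIn "{% block" p then
      -- block_name = part.split()[2]  (Pre_ guarantees the index is in range)
      let name := PySem.List.pyGetD (PySem.Str.split₀ p) 2 ""
      (if ctx.contains name then ctx.getD name [] else []) ++ pyALoop ctx (pyASkip rest)
    else
      p :: pyALoop ctx rest
  termination_by l => l.length
  decreasing_by
  · exact Nat.lt_succ_of_le (pyASkip_length_le rest)
  · simp

def replace_blocks_py (parsed : List String) (context : List (String × List String)) : List String :=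
  pyALoop (PySem.Dict.ofList context) parsed

-- ===== PORT B =====
def pyBMarker (p : String) : Bool := PySem.Str.isIn "{% block" p
def pyBEnd (p : String) : Bool := PySem.Str.isIn "endblock" p

-- Source B: find first block-start index i (the for/enumerate search); if none, return a copy;
-- else find the first endblock index j after i (the `next(range…)` search; j = remaining
-- length when absent), and return parsed[:i] + repl + recursion on parsed[j+1:].
-- List.findIdx returns parsed.length when no marker exists, hence the bound test.
def replace_blocks_py_alt (parsed : List String) (context : List (String × List String)) : List String :=
  let i := parsed.findIdx pyBMarker
  if hn : i < parsed.length then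
    let part := parsed.getD i ""            -- parsed[i]; in range by hn
    let name := PySem.List.pyGetD (PySem.Str.split₀ part) 2 ""
    let ctx := PySem.Dict.ofList context
    let repl := if ctx.contains name then ctx.getD name [] else []
    let after := parsed.drop (i + 1)
    let j := after.findIdx pyBEnd           -- relative index of endblock; = after.length if none
    parsed.take i ++ repl ++ replace_blocks_py_alt (after.drop (j + 1)) context
  else parsed
  termination_by parsed.length
  decreasing_by
    simp only [List.length_drop]
    omega

-- ===== PRECONDITION & SPEC =====
-- Pre_ excludes inputs where some part containing "{% block" has fewer than 3 whitespace tokens: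
-- on such a part `part.split()[2]` raises IndexError in both A and B when the part is reached
-- (this slightly over-excludes malformed markers that only occur inside a skipped region).
def Pre_replace_blocks_py (parsed : List String) (context : List (String × List String)) : Prop :=
  ∀ part ∈ parsed, PySem.Str.isIn "{% block" part = true → 3 ≤ (PySem.Str.split₀ part).length
instance (parsed : List String) (context : List (String × List String)) : Decidable (Pre_replace_blocks_py parsed context) := by unfold Pre_replace_blocks_py; infer_instance
def pvWitness_replace_blocks_py : List String × (List (String × List String)) :=
  (["<h1>", "{% block content %}", "default", "{% endblock %}", "<p>tail</p>"], [("content", ["override"])])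

def Spec_replace_blocks_py (parsed : List String) (context : List (String × List String)) (out : List String) : Prop := out = replace_blocks_py_alt parsed context
instance (parsed : List String) (context : List (String × List String)) (out : List String) : Decidable (Spec_replace_blocks_py parsed context out) := by unfold Spec_replace_blocks_py; infer_instance

-- ===== CLAIM (what is proved, stated in full; the proofs are below) =====
def Claim_equal_replace_blocks_py : Prop := ∀ (parsed : List String) (context : List (String × List String)), Dom_replace_blocks_py parsed context → Pre_replace_blocks_py parsed context → Spec_replace_blocks_py parsed context (replace_blocks_py parsed context)

-- ===== LEMMAS AND PROOFS =====

-- A's inner skip loop is "drop past the first endblock" (drop everything if there is none).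
theorem pyASkip_eq_drop (l : List String) : pyASkip l = l.drop (l.findIdx pyBEnd + 1) := by
  induction l with
  | nil => simp [pyASkip]
  | cons p rest ih =>
    by_cases he : PySem.Str.isIn "endblock" p = true
    · simp only [pyASkip, he, if_pos, List.findIdx_cons, pyBEnd, cond_true]
      rfl
    · simp only [pyASkip, he, Bool.false_eq_true, if_neg, not_false_iff, List.findIdx_cons,
        pyBEnd, cond_false, ih]
      rfl

-- Unfolding B at a non-marker head: the head passes straight through.
theorem alt_cons_not_marker (p : String) (rest : List String) (context : List (String × List String))
    (hp : pyBMarker p = false) :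
    replace_blocks_py_alt (p :: rest) context = p :: replace_blocks_py_alt rest context := by
  rw [replace_blocks_py_alt, replace_blocks_py_alt]
  simp only [List.findIdx_cons, hp, cond_false, List.length_cons]
  by_cases hlt : rest.findIdx pyBMarker < rest.length
  · rw [dif_pos (by omega), dif_pos hlt]
    simp only [List.take_succ_cons, List.getD_cons_succ, List.drop_succ_cons, List.cons_append]
  · rw [dif_neg (by omega), dif_neg hlt]

-- Unfolding B at a marker head.
theorem alt_cons_marker (p : String) (rest : List String) (context : List (String × List String))
    (hp : pyBMarker p = true) :
    replace_blocks_py_alt (p :: rest) context =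
      (if (PySem.Dict.ofList context).contains (PySem.List.pyGetD (PySem.Str.split₀ p) 2 "") then
        (PySem.Dict.ofList context).getD (PySem.List.pyGetD (PySem.Str.split₀ p) 2 "") [] else []) ++
      replace_blocks_py_alt (rest.drop (rest.findIdx pyBEnd + 1)) context := by
  rw [replace_blocks_py_alt]
  simp only [List.findIdx_cons, hp, cond_true, List.length_cons]
  rw [dif_pos (by omega)]
  simp only [List.take_zero, List.getD_cons_zero, List.drop_succ_cons, List.nil_append,
    List.drop_zero]

-- Main equivalence, by strong induction on the length of the part list.
theorem pyALoop_eq_alt (context : List (String × List String)) :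
    ∀ (n : Nat) (l : List String), l.length ≤ n →
      pyALoop (PySem.Dict.ofList context) l = replace_blocks_py_alt l context := by
  intro n
  induction n with
  | zero =>
    intro l hl
    have : l = [] := List.length_eq_zero_iff.mp (Nat.le_zero.mp hl)
    subst this
    rw [pyALoop, replace_blocks_py_alt]
    simp
  | succ n ih =>
    intro l hl
    cases l with
    | nil =>
      rw [pyALoop, replace_blocks_py_alt]
      simp
    | cons p rest =>
      by_cases hp : pyBMarker p = true
      · rw [pyALoop, alt_cons_marker p rest context hp]
        have hp' : PySem.Str.isIn "{% block" p = true := hp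
        simp only [hp', if_pos, pyASkip_eq_drop]
        congr 1
        exact ih _ (by
          have := List.length_drop (l := rest) (i := rest.findIdx pyBEnd + 1)
          simp only [List.length_cons] at hl
          omega)
      · rw [pyALoop, alt_cons_not_marker p rest context (by simpa using hp)]
        have hp' : ¬ PySem.Str.isIn "{% block" p = true := hp
        simp only [hp', if_neg, Bool.false_eq_true, not_false_iff]
        congr 1
        exact ih _ (by simp at hl; omega)

-- ===== VERDICT (by name: the statement is the Claim_ definition above) =====
theorem replace_blocks_py_spec : Claim_equal_replace_blocks_py := by
  intro parsed context _ _
  unfold Spec_replace_blocks_py replace_blocks_py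
  exact pyALoop_eq_alt context parsed.length parsed le_rfl
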